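-- pv_equiv track=rewrite | github.com/Sebastefanelli/Lexer | ent.py | afd_id
-- ===== SOURCE A (Python) =====
-- def afd_id(lexema):
--     estados = ['A', 'B', 'T']
--     estados_finales = ['B']
--     estado_actual = 'A'
--     for c in lexema:
--         if estado_actual == 'A' and c.isalpha():
--             estado_actual = 'B'
--         elif estado_actual == 'B' and c.isalnum():
--             estado_actual = 'B'
--         else:
--             estado_actual = 'T'
--             break
--
--     if estado_actual in estados_finales:
--         return "FINAL"
--     else:
--         return "TRAMPA"
-- ===== SOURCE B (Python) =====
-- def afd_id(lexema):
--     if lexema and lexema[0].isalpha() and all(c.isalnum() for c in lexema[1:]):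
--         return "FINAL"
--     return "TRAMPA"
-- ===== Notes on version B (the rewrite author's own statement) =====
-- stated objective: simpler
-- what changed: Replaced the explicit DFA (state variable, transition branches, break) by one compound boolean: non-empty, first char isalpha, rest all isalnum.
import Mathlib
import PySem

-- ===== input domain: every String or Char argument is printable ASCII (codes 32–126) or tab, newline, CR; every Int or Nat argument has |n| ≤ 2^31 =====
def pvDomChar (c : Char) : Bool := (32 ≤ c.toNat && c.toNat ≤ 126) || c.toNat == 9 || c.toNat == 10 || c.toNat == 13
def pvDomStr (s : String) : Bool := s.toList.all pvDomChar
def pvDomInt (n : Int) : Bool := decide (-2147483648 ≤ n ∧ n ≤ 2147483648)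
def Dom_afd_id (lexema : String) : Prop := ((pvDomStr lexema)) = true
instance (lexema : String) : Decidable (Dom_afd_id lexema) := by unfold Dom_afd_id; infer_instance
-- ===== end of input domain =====

-- B replaces A's explicit DFA loop by one compound boolean test (objective: simpler).


-- ===== PORT A =====
-- the for-loop with break: returns the final estado_actual
def afdLoop (estado_actual : String) (cs : List Char) : String :=
  match cs with
  | [] => estado_actual
  | c :: rest =>
    if estado_actual == "A" && PySem.Chars.isalpha c then afdLoop "B" rest
    else if estado_actual == "B" && PySem.Chars.isalnum c then afdLoop "B" rest
    else "T"  -- break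

def afd_id (lexema : String) : String :=
  let estados_finales : List String := ["B"]
  let estado_actual := afdLoop "A" lexema.toList
  if estados_finales.contains estado_actual then "FINAL" else "TRAMPA"

-- ===== PORT B =====
def afd_id_alt (lexema : String) : String :=
  match lexema.toList with
  | [] => "TRAMPA"
  | c :: rest =>
    if PySem.Chars.isalpha c && rest.all PySem.Chars.isalnum then "FINAL" else "TRAMPA"

-- ===== PRECONDITION & SPEC =====
def Spec_afd_id (lexema : String) (out : String) : Prop := out = afd_id_alt lexema
instance (lexema : String) (out : String) : Decidable (Spec_afd_id lexema out) := by unfold Spec_afd_id; infer_instance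

-- ===== CLAIM (what is proved, stated in full; the proofs are below) =====
def Claim_equal_afd_id : Prop := ∀ (lexema : String), Dom_afd_id lexema → Spec_afd_id lexema (afd_id lexema)

-- ===== LEMMAS AND PROOFS =====
theorem afdLoop_B (cs : List Char) :
    afdLoop "B" cs = (if cs.all PySem.Chars.isalnum then "B" else "T") := by
  induction cs with
  | nil => simp [afdLoop]
  | cons c rest ih =>
    simp only [afdLoop, List.all_cons]
    by_cases h : PySem.Chars.isalnum c = true <;> simp [h, ih]

-- ===== VERDICT (by name: the statement is the Claim_ definition above) =====
theorem afd_id_spec : Claim_equal_afd_id := by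
  intro lexema _
  unfold Spec_afd_id afd_id afd_id_alt
  cases hl : lexema.toList with
  | nil => simp [afdLoop]
  | cons c rest =>
    simp only [afdLoop]
    by_cases ha : PySem.Chars.isalpha c = true
    · by_cases hr : rest.all PySem.Chars.isalnum = true <;> simp [ha, hr, afdLoop_B]
    · simp [ha]
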